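-- pv_equiv track=rewrite | github.com/NeedtoLearn/codejam | 2020/round1A/pascal_walk_1st.py | solve
-- ===== SOURCE A (Python) =====
-- def getK(N):
--     K = 1
--     while K * (K + 1) // 2 <= N - 1:
--         K += 1
--     return K - 1
--
-- def solve(N):
--     K = getK(N)
--     steps = [(1, 1)]
--     for i in range(1, K + 1):
--         steps.append((i + 1, 2))
--     # Find remaining steps
--     remain = N - 1 - K * (K + 1) // 2
--     for i in range(remain):
--         steps.append((K + 1 + i, 1))
--     return steps
-- ===== SOURCE B (Python) =====
-- def solve(N):
--     M = N - 1
--     if M <= 0: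
--         K = 0
--     else:
--         # binary search for the largest K with K*(K+1)//2 <= M
--         lo, hi = 0, M
--         while lo < hi:
--             mid = (lo + hi + 1) // 2
--             if mid * (mid + 1) // 2 <= M:
--                 lo = mid
--             else:
--                 hi = mid - 1
--         K = lo
--     remain = M - K * (K + 1) // 2
--     return [(1, 1)] + [(i + 2, 2) for i in range(K)] + [(K + 1 + i, 1) for i in range(remain)]
-- ===== Notes on version B (the rewrite author's own statement) =====
-- stated objective: alternative
-- what changed: Replaces the linear while-loop search for the step count K by a binary search over the triangular-number bound, and builds the step list with comprehensions instead of append loops.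
import Mathlib
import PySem

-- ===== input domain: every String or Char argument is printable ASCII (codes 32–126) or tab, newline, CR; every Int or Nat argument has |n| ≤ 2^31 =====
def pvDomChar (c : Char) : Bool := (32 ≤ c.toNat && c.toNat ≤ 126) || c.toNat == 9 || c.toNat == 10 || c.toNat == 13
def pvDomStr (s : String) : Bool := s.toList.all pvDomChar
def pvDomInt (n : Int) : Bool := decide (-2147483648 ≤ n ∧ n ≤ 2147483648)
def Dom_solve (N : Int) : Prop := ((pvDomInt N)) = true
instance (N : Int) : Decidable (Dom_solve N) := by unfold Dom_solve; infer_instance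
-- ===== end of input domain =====

-- B replaces A's linear search for K by a binary search and builds the step list with
-- comprehensions; the return values are identical for every Int N.

-- the division K*(K+1)//2 is exact (needed by both ports' termination arguments)
theorem pvTwoTri (K : Int) : 2 * PySem.Int.floordiv (K * (K + 1)) 2 = K * (K + 1) := by
  obtain ⟨m, hm⟩ := Int.even_mul_succ_self K
  have h : PySem.Int.floordiv (K * (K + 1)) 2 = m := by
    rw [PySem.Int.floordiv_eq_iff_of_pos (by omega)]
    omega
  omega

theorem pvGetKloop_lt {N K : Int} (h : PySem.Int.floordiv (K * (K + 1)) 2 ≤ N - 1) : K < N := by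
  have h2 := pvTwoTri K
  rcases le_or_gt 1 K with hK | hK
  · nlinarith
  · nlinarith

-- ===== PORT A =====
def getKloop (N K : Int) : Int :=
  if h : PySem.Int.floordiv (K * (K + 1)) 2 ≤ N - 1 then getKloop N (K + 1) else K
termination_by (N - K).toNat
decreasing_by
  have := pvGetKloop_lt h
  omega

def getK (N : Int) : Int := getKloop N 1 - 1

def solve (N : Int) : List (Int × Int) :=
  let K := getK N
  let steps : List (Int × Int) := [(1, 1)]
  let steps := (PySem.List.pyRange 1 (K + 1) 1).foldl (fun acc i => acc ++ [(i + 1, 2)]) steps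
  let remain := N - 1 - PySem.Int.floordiv (K * (K + 1)) 2
  let steps := (PySem.List.pyRange 0 remain 1).foldl (fun acc i => acc ++ [(K + 1 + i, 1)]) steps
  steps

-- ===== PORT B =====
def pvBsearch (M lo hi : Int) : Int :=
  if hlt : lo < hi then
    let mid := PySem.Int.floordiv (lo + hi + 1) 2
    if PySem.Int.floordiv (mid * (mid + 1)) 2 ≤ M then pvBsearch M mid hi
    else pvBsearch M lo (mid - 1)
  else lo
termination_by (hi - lo).toNat
decreasing_by
  · have := PySem.Int.floordiv_two_mid_bounds (lo := lo + 1) (hi := hi) (by omega)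
    have hmid : lo + 1 + hi = lo + hi + 1 := by ring
    rw [hmid] at this
    omega
  · have := PySem.Int.floordiv_two_mid_bounds (lo := lo + 1) (hi := hi) (by omega)
    have hmid : lo + 1 + hi = lo + hi + 1 := by ring
    rw [hmid] at this
    omega

def solve_alt (N : Int) : List (Int × Int) :=
  let M := N - 1
  let K := if M ≤ 0 then 0 else pvBsearch M 0 M
  let remain := M - PySem.Int.floordiv (K * (K + 1)) 2
  [(1, 1)] ++ (PySem.List.pyRange 0 K 1).map (fun i => (i + 2, 2))
          ++ (PySem.List.pyRange 0 remain 1).map (fun i => (K + 1 + i, 1))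

-- ===== PRECONDITION & SPEC =====
def Spec_solve (N : Int) (out : List (Int × Int)) : Prop := out = solve_alt N
instance (N : Int) (out : List (Int × Int)) : Decidable (Spec_solve N out) := by unfold Spec_solve; infer_instance

-- ===== CLAIM (what is proved, stated in full; the proofs are below) =====
def Claim_equal_solve : Prop := ∀ (N : Int), Dom_solve N → Spec_solve N (solve N)

-- ===== LEMMAS AND PROOFS =====

-- triangular number as both programs compute it (proof-only abbreviation)
def pvTri (K : Int) : Int := PySem.Int.floordiv (K * (K + 1)) 2

theorem pvTri_two (K : Int) : 2 * pvTri K = K * (K + 1) := pvTwoTri K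

theorem pvTri_mono {a b : Int} (ha : 0 ≤ a) (hab : a ≤ b) : pvTri a ≤ pvTri b := by
  have h1 := pvTri_two a
  have h2 := pvTri_two b
  nlinarith

theorem pvTri_nonneg {a : Int} (ha : 0 ≤ a) : 0 ≤ pvTri a := by
  have := pvTri_two a
  nlinarith

-- characterisation of A's loop
theorem pvGetKloop_spec (N K : Int) :
    K ≤ getKloop N K ∧ N - 1 < pvTri (getKloop N K) ∧
      (getKloop N K = K ∨ pvTri (getKloop N K - 1) ≤ N - 1) := by
  induction K using getKloop.induct (N := N) with
  | case1 K h ih =>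
      rw [getKloop, dif_pos h]
      refine ⟨by omega, ih.2.1, ?_⟩
      rcases ih.2.2 with heq | hle
      · right; rw [heq]; simpa [pvTri] using h
      · right; exact hle
  | case2 K h =>
      rw [getKloop, dif_neg h]
      exact ⟨le_refl _, by simpa [pvTri] using not_le.mp h, Or.inl rfl⟩

-- A's getK brackets N - 1 between consecutive triangular numbers (or is 0)
theorem pvGetK_spec (N : Int) :
    0 ≤ getK N ∧ N - 1 < pvTri (getK N + 1) ∧ (getK N = 0 ∨ pvTri (getK N) ≤ N - 1) := by
  obtain ⟨h1, h2, h3⟩ := pvGetKloop_spec N 1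
  unfold getK
  refine ⟨by omega, by simpa using h2, ?_⟩
  rcases h3 with heq | hle
  · left; omega
  · right; simpa using hle

theorem pvBsearch_eq1 (M lo hi : Int) (hlt : lo < hi)
    (hcond : PySem.Int.floordiv ((PySem.Int.floordiv (lo + hi + 1) 2) * ((PySem.Int.floordiv (lo + hi + 1) 2) + 1)) 2 ≤ M) :
    pvBsearch M lo hi = pvBsearch M (PySem.Int.floordiv (lo + hi + 1) 2) hi := by
  rw [pvBsearch]
  simp only [dif_pos hlt, if_pos hcond]

theorem pvBsearch_eq2 (M lo hi : Int) (hlt : lo < hi)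
    (hcond : ¬ PySem.Int.floordiv ((PySem.Int.floordiv (lo + hi + 1) 2) * ((PySem.Int.floordiv (lo + hi + 1) 2) + 1)) 2 ≤ M) :
    pvBsearch M lo hi = pvBsearch M lo (PySem.Int.floordiv (lo + hi + 1) 2 - 1) := by
  rw [pvBsearch]
  simp only [dif_pos hlt, if_neg hcond]

-- B's binary search brackets M between consecutive triangular numbers
theorem pvBsearch_spec (M lo hi : Int) :
    0 ≤ lo → pvTri lo ≤ M → M < pvTri (hi + 1) → lo ≤ hi →
    lo ≤ pvBsearch M lo hi ∧ pvBsearch M lo hi ≤ hi ∧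
      pvTri (pvBsearch M lo hi) ≤ M ∧ M < pvTri (pvBsearch M lo hi + 1) := by
  induction lo, hi using pvBsearch.induct (M := M) with
  | case1 lo hi hlt mid hcond ih =>
      intro hlo hT hhi _
      have hmd : mid = PySem.Int.floordiv (lo + hi + 1) 2 := rfl
      rw [pvBsearch_eq1 M lo hi hlt hcond, ← hmd]
      have hmb := PySem.Int.floordiv_two_mid_bounds (lo := lo + 1) (hi := hi) (by omega)
      have hm : lo + 1 + hi = lo + hi + 1 := by ring
      rw [hm, ← hmd] at hmb
      obtain ⟨a, b, c, d⟩ := ih (by omega) hcond hhi (by omega)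
      exact ⟨by omega, b, c, d⟩
  | case2 lo hi hlt mid hcond ih =>
      intro hlo hT hhi _
      have hmd : mid = PySem.Int.floordiv (lo + hi + 1) 2 := rfl
      rw [pvBsearch_eq2 M lo hi hlt hcond, ← hmd]
      have hmb := PySem.Int.floordiv_two_mid_bounds (lo := lo + 1) (hi := hi) (by omega)
      have hm : lo + 1 + hi = lo + hi + 1 := by ring
      rw [hm, ← hmd] at hmb
      have hmid : M < pvTri (mid - 1 + 1) := by
        have h1 := not_le.mp hcond
        have h2 : mid - 1 + 1 = mid := by ring
        rw [h2]
        exact h1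
      obtain ⟨a, b, c, d⟩ := ih hlo hT hmid (by omega)
      exact ⟨a, by omega, c, d⟩
  | case3 lo hi hlt =>
      intro hlo hT hhi hle
      rw [pvBsearch, dif_neg hlt]
      have : lo = hi := by omega
      subst this
      exact ⟨le_refl _, le_refl _, hT, hhi⟩

-- the two brackets determine K uniquely
theorem pvBracket_unique {M a b : Int} (ha : 0 ≤ a) (hb : 0 ≤ b)
    (ha1 : pvTri a ≤ M) (ha2 : M < pvTri (a + 1))
    (hb1 : pvTri b ≤ M) (hb2 : M < pvTri (b + 1)) : a = b := by
  by_contra hne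
  rcases lt_or_gt_of_ne hne with h | h
  · have := pvTri_mono (by omega : (0:Int) ≤ a + 1) (by omega : a + 1 ≤ b)
    omega
  · have := pvTri_mono (by omega : (0:Int) ≤ b + 1) (by omega : b + 1 ≤ a)
    omega

theorem pvK_eq (N : Int) : getK N = (if N - 1 ≤ 0 then 0 else pvBsearch (N - 1) 0 (N - 1)) := by
  obtain ⟨hg0, hg1, hg2⟩ := pvGetK_spec N
  split_ifs with hM
  · rcases hg2 with h | h
    · exact h
    · have h0 := pvTri_nonneg hg0
      have h2 := pvTri_two (getK N)
      nlinarith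
  · have h0 : pvTri 0 ≤ N - 1 := by
      have := pvTri_two 0
      omega
    have hhi : N - 1 < pvTri (N - 1 + 1) := by
      have := pvTri_two (N - 1 + 1)
      nlinarith
    obtain ⟨a, b, c, d⟩ := pvBsearch_spec (N - 1) 0 (N - 1) (le_refl 0) h0 hhi (by omega)
    rcases hg2 with h | h
    · exfalso
      have h1 := pvTri_two (getK N + 1)
      rw [h] at hg1
      have h2 := pvTri_two (0 + 1)
      simp at hg1 h2
      omega
    · exact pvBracket_unique hg0 a h hg1 c d

theorem pvSolveSpec (N : Int) : solve N = solve_alt N := by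
  have hKeq := pvK_eq N
  simp only [solve, solve_alt]
  rw [← hKeq]
  have hK0 : 0 ≤ getK N := (pvGetK_spec N).1
  set K := getK N with hK
  simp only [PySem.List.foldl_append_singleton_eq_map, List.append_assoc]
  congr 1
  congr 1
  rw [PySem.List.pyRange_one 1 (K + 1), PySem.List.pyRange_one 0 K, List.map_map, List.map_map]
  have h1 : (K + 1 - 1 : Int).toNat = (K - 0 : Int).toNat := by omega
  rw [h1]
  apply List.map_congr_left
  intro k _
  simp only [Function.comp_apply, Prod.mk.injEq]
  constructor
  · ring
  · trivial

-- ===== VERDICT (by name: the statement is the Claim_ definition above) =====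
theorem solve_spec : Claim_equal_solve := by
  intro N _
  unfold Spec_solve
  exact pvSolveSpec N
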